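-- pv_equiv track=rewrite | github.com/DonghakPark/TIL | Study_Problem_Solving/[exec]2.py | solution
-- ===== SOURCE A (Python) =====
-- import copy
--
-- def upperbound_binary_search(topping_list, now_cost, max_cost):
--     left = 0
--     right = len(topping_list) - 1
--
--     while left < right:
--         mid = (right + left) // 2
--         if now_cost + topping_list[mid] <= max_cost:
--             left = mid + 1
--         else:
--             right = mid
--
--     return left
--
-- def solution(M, burger_list, topping_list):
--     answer = 0
--     burger_list.sort()
--     topping_list.sort()
--
--     max_answer = 0
--     now_burger = 0
--
--     len_burger = len(burger_list)
--
--     while now_burger < len_burger: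
--         if burger_list[now_burger] > M:
--             now_burger += 1
--             continue
--
--         temp_cost = burger_list[now_burger]
--
--         res = upperbound_binary_search(topping_list, temp_cost, M)
--         if temp_cost + topping_list[res] <= M:
--             max_answer = max(max_answer, temp_cost + topping_list[res])
--             new_topping = copy.deepcopy(topping_list)
--             new_topping.pop(res)
--
--             temp_cost = temp_cost + topping_list[res]
--
--             res2 = upperbound_binary_search(new_topping, temp_cost, M)
--             if temp_cost + new_topping[res2] <= M:
--                 max_answer = max(max_answer, temp_cost + new_topping[res2])
--
--         else:
--             max_answer = max(max_answer, temp_cost)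
--
--         now_burger += 1
--
--     answer = max_answer
--     if answer == 0:
--         return -1
--
--     return answer
-- ===== SOURCE B (Python) =====
-- def solution(M, burger_list, topping_list):
--     # One pass over burgers using only the two most expensive toppings;
--     # no per-burger binary search, no deepcopy. Does not mutate its arguments
--     # (A sorts both lists in place).
--     t = sorted(topping_list)
--     t1 = t[-1] if len(t) >= 1 else None
--     t2 = t[-2] if len(t) >= 2 else None
--     best = 0
--     for b in burger_list:
--         if b <= M:
--             if t1 is not None and b + t1 <= M:
--                 c = b + t1
--                 if t2 is not None and b + t1 + t2 <= M:
--                     c = max(c, b + t1 + t2)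
--             else:
--                 c = b
--             best = max(best, c)
--     return best if best != 0 else -1
-- ===== Notes on version B (the rewrite author's own statement) =====
-- stated objective: faster
-- what changed: B replaces A's per-burger binary search plus O(T) deepcopy+pop of the topping list by one upfront sort of the toppings, from which only the two most expensive toppings are read, followed by a single pass over the (unsorted) burgers: A only ever pairs a burger with the most expensive topping (and then the second most expensive), so those two values determine every candidate.
-- crash fix: On inputs where some affordable burger (b <= M) meets an empty topping list, or a single-topping list whose topping still fits (b + t <= M), A raises IndexError (it indexes topping_list[res] resp. the popped-empty copy); B returns the best cost using whatever toppings exist (the burger alone, or burger plus the one topping). — e.g. on solution(10, [5], []): A raises IndexError, B returns 5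
import Mathlib
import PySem

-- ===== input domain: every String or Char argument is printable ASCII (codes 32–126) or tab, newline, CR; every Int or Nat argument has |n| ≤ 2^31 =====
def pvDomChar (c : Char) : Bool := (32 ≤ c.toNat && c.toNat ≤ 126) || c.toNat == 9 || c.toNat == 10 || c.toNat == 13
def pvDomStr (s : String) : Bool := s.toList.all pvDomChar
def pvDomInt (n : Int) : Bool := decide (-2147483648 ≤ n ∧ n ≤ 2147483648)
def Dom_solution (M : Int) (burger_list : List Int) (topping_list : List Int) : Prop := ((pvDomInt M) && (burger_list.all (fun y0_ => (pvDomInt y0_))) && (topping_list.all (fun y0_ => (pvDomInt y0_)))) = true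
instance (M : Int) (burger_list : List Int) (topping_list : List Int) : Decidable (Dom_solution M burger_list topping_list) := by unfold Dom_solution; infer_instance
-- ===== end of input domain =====

-- B drops A's per-burger binary search and deepcopy+pop: it sorts the toppings once, reads off
-- the two most expensive toppings, and makes one pass over the burgers (objective: faster).
-- Side effects: Python A sorts both argument lists in place, B does not mutate its arguments;
-- the equivalence proved here is about the RETURN value only.

-- ===== PORT A =====
-- the while left < right loop of upperbound_binary_search; pyGetD is exact here: whenever the
-- body runs, 0 ≤ left < right ≤ len-1 at every call site below, so mid is in range.
def pvUbsLoop (tl : List Int) (now_cost max_cost left right : Int) : Int :=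
  if left < right then
    let mid := PySem.Int.floordiv (right + left) 2
    if now_cost + PySem.List.pyGetD tl mid 0 ≤ max_cost then
      pvUbsLoop tl now_cost max_cost (mid + 1) right
    else
      pvUbsLoop tl now_cost max_cost left mid
  else left
termination_by (right - left).toNat
decreasing_by
  · have h := PySem.Int.floordiv_two_mid_bounds (show left ≤ right by omega)
    rw [Int.add_comm left right] at h
    have h2 : PySem.Int.floordiv (right + left) 2 < right :=
      (PySem.Int.floordiv_lt_iff_lt_mul (by omega)).mpr (by omega)
    omega
  · have h := PySem.Int.floordiv_two_mid_bounds (show left ≤ right by omega)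
    rw [Int.add_comm left right] at h
    have h2 : PySem.Int.floordiv (right + left) 2 < right :=
      (PySem.Int.floordiv_lt_iff_lt_mul (by omega)).mpr (by omega)
    omega

def pvUbs (tl : List Int) (now_cost max_cost : Int) : Int :=
  pvUbsLoop tl now_cost max_cost 0 ((tl.length : Int) - 1)

-- the while now_burger < len_burger loop, walking the sorted burger list in order;
-- out-of-range topping_list[res] / new_topping[res2] is Python's IndexError, excluded by
-- Pre_solution (pyGetD's default is never read inside Pre_); pop(res) never raises where reached.
def pvALoop (M : Int) (tl : List Int) : List Int → Int → Int
  | [], acc => acc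
  | b :: rest, acc =>
    if b > M then pvALoop M tl rest acc
    else
      let res := pvUbs tl b M
      let tres := PySem.List.pyGetD tl res 0
      if b + tres ≤ M then
        let acc1 := max acc (b + tres)
        let newT := ((PySem.List.pop? tl res).map Prod.snd).getD []   -- deepcopy; new_topping.pop(res)
        let cost2 := b + tres
        let res2 := pvUbs newT cost2 M
        let tres2 := PySem.List.pyGetD newT res2 0
        if cost2 + tres2 ≤ M then
          pvALoop M tl rest (max acc1 (cost2 + tres2))
        else
          pvALoop M tl rest acc1
      else
        pvALoop M tl rest (max acc b)

def solution (M : Int) (burger_list : List Int) (topping_list : List Int) : Int :=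
  let bl := PySem.List.sorted burger_list (fun x => x)
  let tl := PySem.List.sorted topping_list (fun x => x)
  let answer := pvALoop M tl bl 0
  if answer = 0 then -1 else answer

-- ===== PORT B =====
-- the candidate cost for one burger b, from the two most expensive toppings t1, t2 (if any)
def pvBCand (M : Int) (t1 t2 : Option Int) (b : Int) : Int :=
  match t1 with
  | some v1 =>
    if b + v1 ≤ M then
      match t2 with
      | some v2 => if b + v1 + v2 ≤ M then max (b + v1) (b + v1 + v2) else b + v1
      | none => b + v1
    else b
  | none => b

def pvBStep (M : Int) (t1 t2 : Option Int) (acc b : Int) : Int :=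
  if b ≤ M then max acc (pvBCand M t1 t2 b) else acc

def solution_alt (M : Int) (burger_list : List Int) (topping_list : List Int) : Int :=
  let t := PySem.List.sorted topping_list (fun x => x)
  let t1 : Option Int := if 1 ≤ t.length then PySem.List.pyGet? t (-1) else none
  let t2 : Option Int := if 2 ≤ t.length then PySem.List.pyGet? t (-2) else none
  let best := burger_list.foldl (pvBStep M t1 t2) 0
  if best = 0 then -1 else best

-- ===== PRECONDITION & SPEC =====
-- Pre_ excludes exactly the inputs on which Python A raises IndexError: some affordable burger
-- (b ≤ M) together with an empty topping list, or with a single-topping list whose topping fits.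
def Pre_solution (M : Int) (burger_list : List Int) (topping_list : List Int) : Prop :=
  ∀ b ∈ burger_list, b ≤ M →
    2 ≤ topping_list.length ∨ (topping_list.length = 1 ∧ ∀ t ∈ topping_list, M < b + t)
instance (M : Int) (burger_list : List Int) (topping_list : List Int) : Decidable (Pre_solution M burger_list topping_list) := by unfold Pre_solution; infer_instance

def pvWitness_solution : Int × List Int × List Int := (10, [5, 20], [1, 2])

-- On inputs where some affordable burger (b ≤ M) meets an empty topping list, or a
-- single-topping list whose topping still fits (b + t ≤ M), A raises IndexError; B returns the
-- best cost using whatever toppings exist.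
def Raises_solution (M : Int) (burger_list : List Int) (topping_list : List Int) : Prop :=
  ∃ b ∈ burger_list, b ≤ M ∧
    (topping_list = [] ∨ (topping_list.length = 1 ∧ ∃ t ∈ topping_list, b + t ≤ M))
instance (M : Int) (burger_list : List Int) (topping_list : List Int) : Decidable (Raises_solution M burger_list topping_list) := by unfold Raises_solution; infer_instance
def pvRaiseWitness_solution : Int × List Int × List Int := (10, [5], [])
def pvRaiseWitnessOut_solution : Int := 5

def Spec_solution (M : Int) (burger_list : List Int) (topping_list : List Int) (out : Int) : Prop := out = solution_alt M burger_list topping_list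
instance (M : Int) (burger_list : List Int) (topping_list : List Int) (out : Int) : Decidable (Spec_solution M burger_list topping_list out) := by unfold Spec_solution; infer_instance

-- ===== CLAIM (what is proved, stated in full; the proofs are below) =====
def Claim_equal_solution : Prop := ∀ (M : Int) (burger_list : List Int) (topping_list : List Int), Dom_solution M burger_list topping_list → Pre_solution M burger_list topping_list → Spec_solution M burger_list topping_list (solution M burger_list topping_list)
def Claim_raises_solution : Prop := (∀ (M : Int) (burger_list : List Int) (topping_list : List Int), Dom_solution M burger_list topping_list → Raises_solution M burger_list topping_list → ¬ Pre_solution M burger_list topping_list) ∧ (Dom_solution (pvRaiseWitness_solution.1) (pvRaiseWitness_solution.2.1) (pvRaiseWitness_solution.2.2) ∧ Raises_solution (pvRaiseWitness_solution.1) (pvRaiseWitness_solution.2.1) (pvRaiseWitness_solution.2.2) ∧ solution_alt (pvRaiseWitness_solution.1) (pvRaiseWitness_solution.2.1) (pvRaiseWitness_solution.2.2) = pvRaiseWitnessOut_solution)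

-- ===== LEMMAS AND PROOFS =====

-- A sorted list is monotone at indices.
theorem pvSortedMono (l : List Int) (hp : l.Pairwise (· ≤ ·)) (i j : Nat)
    (hij : i ≤ j) (hj : j < l.length) : l[i]'(by omega) ≤ l[j] := by
  rcases Nat.lt_or_ge i j with h | h
  · exact List.pairwise_iff_getElem.mp hp i j (by omega) hj h
  · have : i = j := by omega
    subst this; rfl

-- Invariant-carrying specification of the binary-search loop: every index below the result
-- "fits", and the result either is the last index or does not fit.
theorem pvUbsLoop_spec (tl : List Int) (b M : Int) (hs : tl.Pairwise (· ≤ ·))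
    (l r : Int) (h0 : 0 ≤ l) (hlr : l ≤ r) (hrlen : r ≤ (tl.length : Int) - 1)
    (hlow : ∀ i : Nat, (i : Int) < l → ∀ h : i < tl.length, b + tl[i] ≤ M)
    (hhigh : r = (tl.length : Int) - 1 ∨ ¬ (b + PySem.List.pyGetD tl r 0 ≤ M)) :
    l ≤ pvUbsLoop tl b M l r ∧ pvUbsLoop tl b M l r ≤ r ∧
    (∀ i : Nat, (i : Int) < pvUbsLoop tl b M l r → ∀ h : i < tl.length, b + tl[i] ≤ M) ∧
    (pvUbsLoop tl b M l r = (tl.length : Int) - 1 ∨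
      ¬ (b + PySem.List.pyGetD tl (pvUbsLoop tl b M l r) 0 ≤ M)) := by
  rw [pvUbsLoop]
  by_cases hc : l < r
  · simp only [if_pos hc]
    have hb := PySem.Int.floordiv_two_mid_bounds (show l ≤ r by omega)
    rw [Int.add_comm l r] at hb
    have hmlt : PySem.Int.floordiv (r + l) 2 < r :=
      (PySem.Int.floordiv_lt_iff_lt_mul (by omega)).mpr (by omega)
    set mid := PySem.Int.floordiv (r + l) 2 with hmid
    have hget : PySem.List.pyGetD tl mid 0 = tl[mid.toNat]'(by omega) :=
      PySem.List.pyGetD_eq_getElem tl 0 (by omega) (by omega)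
    by_cases hfit : b + PySem.List.pyGetD tl mid 0 ≤ M
    · simp only [if_pos hfit]
      have hlow' : ∀ i : Nat, (i : Int) < mid + 1 → ∀ h : i < tl.length, b + tl[i] ≤ M := by
        intro i hi h
        have hm := pvSortedMono tl hs i mid.toNat (by omega) (by omega)
        rw [hget] at hfit
        omega
      have H := pvUbsLoop_spec tl b M hs (mid + 1) r (by omega) (by omega) hrlen hlow' hhigh
      exact ⟨by omega, H.2.1, H.2.2.1, H.2.2.2⟩
    · simp only [if_neg hfit]
      have H := pvUbsLoop_spec tl b M hs l mid h0 (by omega) (by omega) hlow (Or.inr hfit)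
      exact ⟨H.1, by omega, H.2.2.1, H.2.2.2⟩
  · simp only [if_neg hc]
    have hlr' : l = r := by omega
    subst hlr'
    exact ⟨le_refl l, le_refl l, hlow, hhigh⟩
termination_by (r - l).toNat
decreasing_by
  all_goals
    have hcomm : PySem.Int.floordiv (l + r) 2 = PySem.Int.floordiv (r + l) 2 := by
      rw [Int.add_comm]
    omega

-- On a nonempty sorted list: the found topping fits iff the most expensive one does,
-- and in that case the search lands exactly on the last index.
theorem pvUbs_spec (tl : List Int) (b M : Int) (hs : tl.Pairwise (· ≤ ·))
    (hne : tl ≠ []) :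
    0 ≤ pvUbs tl b M ∧ pvUbs tl b M ≤ (tl.length : Int) - 1 ∧
    ((b + PySem.List.pyGetD tl (pvUbs tl b M) 0 ≤ M) ↔
      (b + tl[tl.length - 1]'(by cases tl <;> simp_all) ≤ M)) ∧
    ((b + tl[tl.length - 1]'(by cases tl <;> simp_all) ≤ M) →
      pvUbs tl b M = (tl.length : Int) - 1) := by
  have hlen : 1 ≤ tl.length := by cases tl <;> simp_all
  have H := pvUbsLoop_spec tl b M hs 0 ((tl.length : Int) - 1) (by omega) (by omega)
    (by omega) (by intro i hi h; omega) (Or.inl rfl)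
  rw [pvUbs] at *
  set res := pvUbsLoop tl b M 0 ((tl.length : Int) - 1) with hres
  obtain ⟨h1, h2, hlow, hdisj⟩ := H
  have hgr : PySem.List.pyGetD tl res 0 = tl[res.toNat]'(by omega) :=
    PySem.List.pyGetD_eq_getElem tl 0 (by omega) (by omega)
  have hlast : ∀ hfitlast : b + tl[tl.length - 1]'(by omega) ≤ M, res = (tl.length : Int) - 1 := by
    intro hfitlast
    rcases hdisj with h | h
    · exact h
    · exfalso
      apply h
      rw [hgr]
      have := pvSortedMono tl hs res.toNat (tl.length - 1) (by omega) (by omega)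
      omega
  refine ⟨h1, h2, ⟨?_, ?_⟩, hlast⟩
  · intro hfit
    rcases hdisj with h | h
    · rw [hgr] at hfit
      have heq : res.toNat = tl.length - 1 := by omega
      simp only [heq] at hfit
      exact hfit
    · exact absurd hfit h
  · intro hfitlast
    have := hlast hfitlast
    rw [hgr]
    have heq : res.toNat = tl.length - 1 := by omega
    simp only [heq]
    exact hfitlast

theorem pvGetNegOne (tl : List Int) (h : 1 ≤ tl.length) :
    PySem.List.pyGet? tl (-1) = some (tl[tl.length - 1]'(by omega)) := by
  rw [PySem.List.pyGet?_neg_one, List.getLast?_eq_getElem?]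
  simp [List.getElem?_eq_getElem (by omega : tl.length - 1 < tl.length)]

theorem pvGetNegTwo (tl : List Int) (h : 2 ≤ tl.length) :
    PySem.List.pyGet? tl (-2) = some (tl[tl.length - 2]'(by omega)) := by
  rw [PySem.List.pyGet?_neg_ofNat tl 2 (by omega) (by omega)]
  simp [List.getElem?_eq_getElem (by omega : tl.length - 2 < tl.length)]

-- The burger loop of A computes, step for step, B's fold over the same burgers.
theorem pvALoop_eq_foldl (M : Int) (tl : List Int) (hs : tl.Pairwise (· ≤ ·))
    (t1 t2 : Option Int)
    (ht1 : t1 = if 1 ≤ tl.length then PySem.List.pyGet? tl (-1) else none)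
    (ht2 : t2 = if 2 ≤ tl.length then PySem.List.pyGet? tl (-2) else none) :
    ∀ (bl : List Int) (acc : Int),
    (∀ b ∈ bl, b ≤ M → 2 ≤ tl.length ∨ (tl.length = 1 ∧ ∀ t ∈ tl, M < b + t)) →
    pvALoop M tl bl acc = bl.foldl (pvBStep M t1 t2) acc := by
  intro bl
  induction bl with
  | nil => intro acc _; rfl
  | cons b rest ih =>
    intro acc hpre
    have hrest : ∀ b' ∈ rest, b' ≤ M → 2 ≤ tl.length ∨ (tl.length = 1 ∧ ∀ t ∈ tl, M < b' + t) := by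
      intro b' hb'; exact hpre b' (List.mem_cons_of_mem _ hb')
    rw [List.foldl_cons]
    by_cases hbM : b > M
    · simp only [pvALoop]
      rw [if_pos hbM, ih _ hrest]
      have : pvBStep M t1 t2 acc b = acc := by
        unfold pvBStep
        rw [if_neg (by omega)]
      rw [this]
    · have hcase := hpre b (List.mem_cons_self) (by omega)
      have hlen : 1 ≤ tl.length := by omega
      have hne : tl ≠ [] := by cases tl <;> simp_all
      obtain ⟨u1, u2, uiff, ulast⟩ := pvUbs_spec tl b M hs hne
      have ht1' : t1 = some (tl[tl.length - 1]'(by omega)) := by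
        rw [ht1, if_pos hlen, pvGetNegOne tl hlen]
      simp only [pvALoop]
      rw [if_neg hbM]
      by_cases hfit : b + PySem.List.pyGetD tl (pvUbs tl b M) 0 ≤ M
      · -- the most expensive topping fits: the search landed on the last index
        have hfitlast : b + tl[tl.length - 1]'(by omega) ≤ M := uiff.mp hfit
        have hreseq : pvUbs tl b M = (tl.length : Int) - 1 := ulast hfitlast
        have htres : PySem.List.pyGetD tl (pvUbs tl b M) 0 = tl[tl.length - 1]'(by omega) := by
          rw [hreseq, show ((tl.length : Int) - 1) = ((tl.length - 1 : Nat) : Int) by omega,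
            PySem.List.pyGetD_natCast]
          simp [List.getD_eq_getElem?_getD,
            List.getElem?_eq_getElem (show tl.length - 1 < tl.length by omega)]
        -- Pre_ rules out the single-topping case here
        have hlen2 : 2 ≤ tl.length := by
          rcases hcase with h | ⟨h1, h2⟩
          · exact h
          · exfalso
            have := h2 (tl[tl.length - 1]'(by omega)) (by exact List.getElem_mem _)
            omega
        have ht2' : t2 = some (tl[tl.length - 2]'(by omega)) := by
          rw [ht2, if_pos hlen2, pvGetNegTwo tl hlen2]
        -- the popped deep copy is dropLast
        have hpop : ((PySem.List.pop? tl (pvUbs tl b M)).map Prod.snd).getD [] = tl.dropLast := by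
          rw [show pvUbs tl b M = ((tl.length - 1 : Nat) : Int) by omega,
            PySem.List.pop?_natCast tl (tl.length - 1) (by omega)]
          simp
        rw [if_pos hfit, hpop]
        have hsd : tl.dropLast.Pairwise (· ≤ ·) := hs.sublist (List.dropLast_sublist tl)
        have hlend : tl.dropLast.length = tl.length - 1 := List.length_dropLast
        have hned : tl.dropLast ≠ [] := by
          intro hc; rw [hc] at hlend; simp at hlend; omega
        obtain ⟨w1, w2, wiff, wlast⟩ :=
          pvUbs_spec tl.dropLast (b + PySem.List.pyGetD tl (pvUbs tl b M) 0) M hsd hned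
        have hdl : tl.dropLast[tl.dropLast.length - 1]'(by omega) = tl[tl.length - 2]'(by omega) := by
          rw [List.getElem_dropLast]
          congr 1
          omega
        by_cases hfit2 : b + PySem.List.pyGetD tl (pvUbs tl b M) 0 +
            PySem.List.pyGetD tl.dropLast
              (pvUbs tl.dropLast (b + PySem.List.pyGetD tl (pvUbs tl b M) 0) M) 0 ≤ M
        · rw [if_pos hfit2, ih _ hrest]
          congr 1
          have hfl2 : b + PySem.List.pyGetD tl (pvUbs tl b M) 0 +
              tl.dropLast[tl.dropLast.length - 1]'(by omega) ≤ M := wiff.mp hfit2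
          have hr2 : pvUbs tl.dropLast (b + PySem.List.pyGetD tl (pvUbs tl b M) 0) M =
              (tl.dropLast.length : Int) - 1 := wlast hfl2
          have htres2 : PySem.List.pyGetD tl.dropLast
              (pvUbs tl.dropLast (b + PySem.List.pyGetD tl (pvUbs tl b M) 0) M) 0 =
              tl[tl.length - 2]'(by omega) := by
            rw [← hdl, hr2,
              show ((tl.dropLast.length : Int) - 1) = ((tl.dropLast.length - 1 : Nat) : Int) by omega,
              PySem.List.pyGetD_natCast]
            simp only [List.getD_eq_getElem?_getD]
            rw [List.getElem?_eq_getElem (show tl.dropLast.length - 1 < tl.dropLast.length by omega)]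
            simp
          unfold pvBStep pvBCand
          rw [if_pos (by omega), ht1', ht2']
          simp only
          rw [htres2] at hfit2 ⊢
          rw [htres] at hfit hfit2 ⊢
          rw [if_pos hfit, if_pos (by omega)]
          omega
        · rw [if_neg hfit2, ih _ hrest]
          congr 1
          unfold pvBStep pvBCand
          rw [if_pos (by omega), ht1', ht2']
          simp only
          have hnf2 : ¬ (b + PySem.List.pyGetD tl (pvUbs tl b M) 0 +
              tl[tl.length - 2]'(by omega) ≤ M) := by
            intro hc
            apply hfit2
            rw [← hdl] at hc
            exact wiff.mpr hc
          rw [htres] at hfit hnf2 ⊢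
          rw [if_pos hfit, if_neg (by omega)]
      · rw [if_neg hfit, ih _ hrest]
        congr 1
        unfold pvBStep pvBCand
        rw [if_pos (by omega), ht1']
        simp only
        have : ¬ (b + tl[tl.length - 1]'(by omega) ≤ M) := fun hc => hfit (uiff.mpr hc)
        rw [if_neg (by omega)]

-- ===== VERDICT (by name: the statement is the Claim_ definition above) =====
theorem solution_spec : Claim_equal_solution := by
  intro M burger_list topping_list _ hpre
  unfold Spec_solution solution solution_alt
  simp only
  set tl := PySem.List.sorted topping_list (fun x => x) with htl
  have hperm : tl.Perm topping_list := PySem.List.sorted_perm topping_list _ _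
  have hs : tl.Pairwise (· ≤ ·) := PySem.List.sorted_pairwise topping_list (fun x => x)
  have hlen : tl.length = topping_list.length := hperm.length_eq
  have hpre' : ∀ b ∈ PySem.List.sorted burger_list (fun x => x), b ≤ M →
      2 ≤ tl.length ∨ (tl.length = 1 ∧ ∀ t ∈ tl, M < b + t) := by
    intro b hb hbM
    rcases hpre b ((PySem.List.mem_sorted _ _ _ _).mp hb) hbM with h | ⟨h1, h2⟩
    · exact Or.inl (by omega)
    · exact Or.inr ⟨by omega, fun t ht => h2 t (hperm.mem_iff.mp ht)⟩
  rw [pvALoop_eq_foldl M tl hs _ _ rfl rfl _ 0 hpre']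
  haveI : RightCommutative (pvBStep M
      (if 1 ≤ tl.length then PySem.List.pyGet? tl (-1) else none)
      (if 2 ≤ tl.length then PySem.List.pyGet? tl (-2) else none)) := ⟨by
    intro a b1 b2
    unfold pvBStep
    split_ifs <;> simp [max_right_comm]⟩
  rw [(PySem.List.sorted_perm burger_list (fun x => x) false).foldl_eq 0]

@[simp] theorem solution_raises : Claim_raises_solution := by
  unfold Claim_raises_solution
  constructor
  · rintro M burger_list topping_list _ ⟨b, hb, hbM, hc⟩ hpre
    rcases hpre b hb hbM with h | ⟨h1, h2⟩ <;>
      rcases hc with hnil | ⟨hl1, t, ht, hfit⟩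
    · rw [hnil] at h; simp at h
    · omega
    · rw [hnil] at h1; simp at h1
    · have := h2 t ht; omega
  · exact ⟨by decide, by decide, by decide⟩
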